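-- pv_equiv track=rewrite | github.com/pypi-data/pypi-mirror-386 | packages/dspawpy/dspawpy-1.8.4-py3-none-any.whl/dspawpy/io/export.py | _split_atomIndex_orbital
-- ===== SOURCE A (Python) =====
-- def _split_atomIndex_orbital(s: str) -> tuple[int, str]:
--     first_letter_index = -1
--     for i, char in enumerate(s):
--         if not char.isdigit():
--             first_letter_index = i
--             break
--
--     if (
--         first_letter_index == -1
--     ):  # No letters found, assume the whole string is the atomIndex
--         return int(s), ""
--     else:
--         atom_index_str = s[:first_letter_index]
--         orbital_str = s[first_letter_index:]
--         return int(atom_index_str), orbital_str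
-- ===== SOURCE B (Python) =====
-- import re
--
-- def _split_atomIndex_orbital(s: str) -> tuple[int, str]:
--     m = re.fullmatch(r"(\d*)(.*)", s, re.DOTALL)
--     return int(m.group(1)), m.group(2)
-- ===== Notes on version B (the rewrite author's own statement) =====
-- stated objective: idiomatic
-- what changed: Replaces A's explicit enumerate loop with -1 sentinel, break and two return branches by a single regex fullmatch r'(\d*)(.*)' (DOTALL): the greedy \d* group is the atom index and the second group the orbital; no loop, index variable or branch remains.
-- outside the precondition, e.g. on _split_atomIndex_orbital('a1'): A raises ValueError, B raises ValueError; on _split_atomIndex_orbital(''): A raises ValueError, B raises ValueError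
import Mathlib
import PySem

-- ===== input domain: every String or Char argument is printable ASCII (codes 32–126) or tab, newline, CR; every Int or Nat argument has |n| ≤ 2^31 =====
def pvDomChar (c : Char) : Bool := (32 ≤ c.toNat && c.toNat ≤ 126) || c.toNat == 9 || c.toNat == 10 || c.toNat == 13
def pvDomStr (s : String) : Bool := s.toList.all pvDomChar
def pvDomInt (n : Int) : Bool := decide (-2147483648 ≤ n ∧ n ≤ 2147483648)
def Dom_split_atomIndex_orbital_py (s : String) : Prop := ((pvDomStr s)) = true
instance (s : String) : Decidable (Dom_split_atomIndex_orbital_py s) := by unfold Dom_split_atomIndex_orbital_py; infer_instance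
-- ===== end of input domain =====

-- B replaces A's manual indexed scan with break/-1 sentinel by a single regex fullmatch r"(\d*)(.*)" (DOTALL) whose two groups are the result (idiomatic).

-- ===== PORT A =====
-- the 'for i, char in enumerate(s): if not char.isdigit(): first_letter_index = i; break' loop
def pvFindA : List (Int × Char) → Int
  | [] => -1
  | (i, c) :: rest => if ¬ PySem.Chars.isdigit c then i else pvFindA rest

def split_atomIndex_orbital_py (s : String) : Int × String :=
  let fli := pvFindA (PySem.List.enumerate s.toList 0)
  if fli = -1 then
    ((PySem.Int.ofChars? s.toList).getD 0, "")          -- int(s); Pre_ excludes the ValueError case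
  else
    let atom := PySem.List.slice s.toList none (some fli)      -- s[:fli]
    let orb  := PySem.List.slice s.toList (some fli) none      -- s[fli:]
    ((PySem.Int.ofChars? atom).getD 0, String.ofList orb)

-- ===== PORT B =====
-- hand port of re.fullmatch(r"(\d*)(.*)", s, re.DOTALL): the greedy `\d*` group is the
-- longest digit prefix (on the ASCII domain `\d` is exactly Chars.isdigit) and the DOTALL
-- `(.*)` group is everything after it; exact on Dom_.
def split_atomIndex_orbital_py_alt (s : String) : Int × String :=
  let g1 := s.toList.takeWhile PySem.Chars.isdigit      -- m.group(1)
  let g2 := s.toList.dropWhile PySem.Chars.isdigit      -- m.group(2)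
  ((PySem.Int.ofChars? g1).getD 0, String.ofList g2)    -- int(m.group(1)); Pre_ excludes the ValueError case

-- ===== PRECONDITION & SPEC =====
-- Pre_ excludes exactly the inputs where A raises ValueError: when s has no leading digit
-- (empty s or a non-digit first char) int('') / int(s) fails; B raises there too.
def Pre_split_atomIndex_orbital_py (s : String) : Prop :=
  PySem.Chars.isdigit (s.toList.headD ' ') = true
instance (s : String) : Decidable (Pre_split_atomIndex_orbital_py s) := by
  unfold Pre_split_atomIndex_orbital_py; infer_instance
def pvWitness_split_atomIndex_orbital_py : String := "12dxy"

def Spec_split_atomIndex_orbital_py (s : String) (out : Int × String) : Prop := out = split_atomIndex_orbital_py_alt s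
instance (s : String) (out : Int × String) : Decidable (Spec_split_atomIndex_orbital_py s out) := by unfold Spec_split_atomIndex_orbital_py; infer_instance

-- ===== CLAIM (what is proved, stated in full; the proofs are below) =====
def Claim_equal_split_atomIndex_orbital_py : Prop := ∀ (s : String), Dom_split_atomIndex_orbital_py s → Pre_split_atomIndex_orbital_py s → Spec_split_atomIndex_orbital_py s (split_atomIndex_orbital_py s)

-- ===== LEMMAS AND PROOFS =====

-- A's loop over enumerate finds the first non-digit index
lemma pvFindA_spec (l : List Char) (k : Int) :
    pvFindA (PySem.List.enumerate l k) =
      if l.all PySem.Chars.isdigit then -1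
      else k + ((l.takeWhile PySem.Chars.isdigit).length : Int) := by
  induction l generalizing k with
  | nil => simp [PySem.List.enumerate_nil, pvFindA]
  | cons c t ih =>
    rw [PySem.List.enumerate_cons]
    by_cases h : PySem.Chars.isdigit c
    · simp [pvFindA, h, ih, List.all_cons]
      split_ifs <;> omega
    · simp [pvFindA, h, List.all_cons]

-- ===== VERDICT (by name: the statement is the Claim_ definition above) =====
theorem split_atomIndex_orbital_py_spec : Claim_equal_split_atomIndex_orbital_py := by
  intro s _ _
  unfold Spec_split_atomIndex_orbital_py split_atomIndex_orbital_py split_atomIndex_orbital_py_alt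
  simp only [pvFindA_spec]
  by_cases hall : s.toList.all PySem.Chars.isdigit
  · have htw : s.toList.takeWhile PySem.Chars.isdigit = s.toList := by
      rw [List.takeWhile_eq_self_iff]; intro x hx; exact (List.all_eq_true.mp hall) x hx
    have hdw : s.toList.dropWhile PySem.Chars.isdigit = [] := by
      rw [List.dropWhile_eq_nil_iff]; intro x hx; exact (List.all_eq_true.mp hall) x hx
    simp [hall, htw, hdw]
  · have hne : ¬((0:Int) + ((s.toList.takeWhile PySem.Chars.isdigit).length : Int) = -1) := by
      have := Int.natCast_nonneg (s.toList.takeWhile PySem.Chars.isdigit).length; omega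
    rw [if_neg hall, if_neg hne, zero_add]
    have htake : PySem.List.slice s.toList none (some ((s.toList.takeWhile PySem.Chars.isdigit).length : Int))
        = s.toList.takeWhile PySem.Chars.isdigit := by
      rw [PySem.List.slice_to s.toList (Int.natCast_nonneg _)]
      simp only [Int.toNat_natCast]
      exact (List.prefix_iff_eq_take.mp (List.takeWhile_prefix _)).symm
    have hdrop : PySem.List.slice s.toList (some ((s.toList.takeWhile PySem.Chars.isdigit).length : Int)) none
        = s.toList.dropWhile PySem.Chars.isdigit := by
      rw [PySem.List.slice_from s.toList (Int.natCast_nonneg _)]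
      simp only [Int.toNat_natCast]
      set t := s.toList.takeWhile PySem.Chars.isdigit with ht
      set d := s.toList.dropWhile PySem.Chars.isdigit with hd
      have hsplit : t ++ d = s.toList := List.takeWhile_append_dropWhile
      rw [← hsplit, List.drop_left]
    rw [htake, hdrop]
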